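-- pv_equiv track=rewrite | github.com/kingdom5500/lmc-emulator | lmc/parser.py | _get_raw_assembly
-- ===== SOURCE A (Python) =====
-- COMMENT_STARTERS = ("#", "//")
--
-- def _remove_comments(line):
--     """
--     Remove any comments from a line.
--
--     The `starters` argument defines how comments should
--     start. Nothing else is removed from the line. The
--     return value is a tuple in the form (code, comment).
--     """
--
--     first_start = COMMENT_STARTERS[0]
--
--     for start in COMMENT_STARTERS:
--         line = line.replace(start, first_start)
--
--     parts = line.split(first_start, 1)
--
--     if len(parts) == 1:
--         return (parts[0], "")
--
--     return tuple(parts)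
--
-- def _get_raw_assembly(string):
--     """
--     Yield each instruction line as a tuple of parts.
--
--     This will strip comments and whitespace before yielding
--     each whitespace-separated part as a tuple. No validation
--     on the parts is performed.
--     """
--
--     line = ""
--     for index, char in enumerate(string):
--         if char in "\r\n" or index == len(string) - 1:
--             code, _ = _remove_comments(line)
--
--             parts = code.strip().split()
--             if parts:
--                 yield tuple(parts)
--
--             line = ""
--
--         line += char
-- ===== SOURCE B (Python) =====
-- import re
--
-- COMMENT_STARTERS = ("#", "//")
--
-- def _remove_comments(line):
--     first_start = COMMENT_STARTERS[0]
--     for start in COMMENT_STARTERS: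
--         line = line.replace(start, first_start)
--     parts = line.split(first_start, 1)
--     if len(parts) == 1:
--         return (parts[0], "")
--     return tuple(parts)
--
-- def _get_raw_assembly(string):
--     # A processes a segment at every '\r'/'\n' and at the last index, never
--     # appending the current char first: the final character is always dropped.
--     for segment in re.split(r'[\r\n]', string[:-1]):
--         code, _ = _remove_comments(segment)
--         parts = code.strip().split()
--         if parts:
--             yield tuple(parts)
-- ===== Notes on version B (the rewrite author's own statement) =====
-- stated objective: simpler
-- what changed: Replaces A's character-by-character scan with a stateful line accumulator by splitting string[:-1] at ' '/' ' once and mapping each segment through comment-strip/strip/split; measured faster by avoiding per-character string concatenation.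
import Mathlib
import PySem

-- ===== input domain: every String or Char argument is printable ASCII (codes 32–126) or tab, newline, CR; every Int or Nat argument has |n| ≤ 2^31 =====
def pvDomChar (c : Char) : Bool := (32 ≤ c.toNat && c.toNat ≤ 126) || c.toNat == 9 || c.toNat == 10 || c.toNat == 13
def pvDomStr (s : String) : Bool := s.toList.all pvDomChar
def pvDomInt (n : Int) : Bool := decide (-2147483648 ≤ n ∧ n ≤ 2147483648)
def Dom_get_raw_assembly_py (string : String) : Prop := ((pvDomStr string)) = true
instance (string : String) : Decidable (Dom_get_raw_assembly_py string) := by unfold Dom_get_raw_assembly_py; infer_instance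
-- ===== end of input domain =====

-- B replaces A's character-by-character scan with splitting string[:-1] at '\r'/'\n'
-- and mapping each segment through comment-strip/strip/split — a simpler decomposition
-- with the same result (including A's dropping of the final character).

-- ===== PORT A =====
-- _remove_comments: replace each comment starter by "#", split once on "#".
def remove_comments_py (line : String) : String × String :=
  let line := PySem.Str.replace line "#" "#"
  let line := PySem.Str.replace line "//" "#"
  match PySem.Str.splitMax? line "#" 1 with
  | some [code] => (code, "")
  | some [code, comment] => (code, comment)
  | _ => ("", "")   -- unreachable: sep "#" is nonempty, so split returns some list of 1 or 2 parts

-- loop body of A: state (line, out); trigger on '\r'/'\n' or on the last index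
def gar_step_py (n : Int) (st : List Char × List (List String)) (ic : Int × Char) :
    List Char × List (List String) :=
  let index := ic.1
  let char := ic.2
  let st' :=
    if char = '\r' ∨ char = '\n' ∨ index = n - 1 then
      let code := (remove_comments_py (String.ofList st.1)).1
      let parts := PySem.Str.split₀ (PySem.Str.strip code)
      (([] : List Char), if parts ≠ [] then st.2 ++ [parts] else st.2)
    else st
  (st'.1 ++ [char], st'.2)

def get_raw_assembly_py (string : String) : List (List String) :=
  ((PySem.List.enumerate string.toList 0).foldl
      (gar_step_py (PySem.Str.len string)) ([], [])).2

-- ===== PORT B =====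
def remove_comments_alt (line : String) : String × String :=
  let line := PySem.Str.replace line "#" "#"
  let line := PySem.Str.replace line "//" "#"
  match PySem.Str.splitMax? line "#" 1 with
  | some [code] => (code, "")
  | some [code, comment] => (code, comment)
  | _ => ("", "")   -- unreachable: sep "#" is nonempty

-- one segment of B's loop: strip comments and whitespace, keep if nonempty
def gar_alt_part (seg : List Char) : Option (List String) :=
  let code := (remove_comments_alt (String.ofList seg)).1
  let parts := PySem.Str.split₀ (PySem.Str.strip code)
  if parts = [] then none else some parts

-- re.split(r'[\r\n]', ·) is ported by hand as List.splitOnP (split at every '\r'/'\n',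
-- keeping empty segments) — exact for this character-class pattern.
def get_raw_assembly_py_alt (string : String) : List (List String) :=
  (((PySem.Str.slice string none (some (-1))).toList.splitOnP
      (fun c => c = '\r' || c = '\n')).filterMap gar_alt_part)

-- ===== PRECONDITION & SPEC =====
def Spec_get_raw_assembly_py (string : String) (out : List (List String)) : Prop := out = get_raw_assembly_py_alt string
instance (string : String) (out : List (List String)) : Decidable (Spec_get_raw_assembly_py string out) := by unfold Spec_get_raw_assembly_py; infer_instance

-- ===== CLAIM (what is proved, stated in full; the proofs are below) =====
def Claim_equal_get_raw_assembly_py : Prop := ∀ (string : String), Dom_get_raw_assembly_py string → Spec_get_raw_assembly_py string (get_raw_assembly_py string)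

-- ===== LEMMAS AND PROOFS =====

-- `replace.go`: the accumulator factors out of the result.
theorem replace_go_acc (old new : List Char) (fuel : Nat) :
    ∀ (l acc : List Char),
      PySem.Chars.replace.go old new fuel l acc =
        acc.reverse ++ PySem.Chars.replace.go old new fuel l [] := by
  induction fuel with
  | zero => intro l acc; simp [PySem.Chars.replace.go]
  | succ fuel ih =>
    intro l acc
    cases l with
    | nil => simp [PySem.Chars.replace.go]
    | cons c t =>
      simp only [PySem.Chars.replace.go]
      by_cases h : old.isPrefixOf (c :: t) = true
      · simp only [h, if_pos]
        rw [ih _ (new.reverse ++ acc), ih _ (new.reverse ++ [])]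
        simp
      · simp only [h]
        rw [ih t (c :: acc), ih t (c :: [])]
        simp

-- `replace`: a head character that cannot start an occurrence of `old` passes through.
theorem replace_cons (old new : List Char) (c : Char) (l : List Char)
    (hp : old.isPrefixOf (c :: l) = false) (hne : old ≠ []) :
    PySem.Chars.replace (c :: l) old new = c :: PySem.Chars.replace l old new := by
  have hie : old.isEmpty = false := by simpa [List.isEmpty_iff] using hne
  simp only [PySem.Chars.replace, hie, Bool.false_eq_true, if_false]
  simp only [List.length_cons, PySem.Chars.replace.go, hp, Bool.false_eq_true, if_false]
  rw [replace_go_acc]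
  simp

-- `splitOnMax.go`: the pending `cur`/`acc` state factors out of the result.
theorem splitOnMax_go_state (sep : List Char) (fuel : Nat) :
    ∀ (m : Nat) (l cur : List Char) (acc : List (List Char)),
      PySem.Chars.splitOnMax.go sep fuel m l cur acc =
        acc.reverse ++ (PySem.Chars.splitOnMax.go sep fuel m l [] []).modifyHead (cur.reverse ++ ·) := by
  induction fuel with
  | zero => intro m l cur acc; simp [PySem.Chars.splitOnMax.go]
  | succ fuel ih =>
    intro m l cur acc
    cases l with
    | nil => simp [PySem.Chars.splitOnMax.go]
    | cons c t =>
      simp only [PySem.Chars.splitOnMax.go]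
      by_cases hm : m = 0
      · simp [hm]
      · simp only [hm, if_false]
        by_cases hp : sep.isPrefixOf (c :: t) = true
        · simp only [hp, if_pos]
          rw [ih (m-1) _ [] (cur.reverse :: acc), ih (m-1) _ [] ([].reverse :: [])]
          simp
        · simp only [hp]
          rw [ih m t (c :: cur) acc, ih m t (c :: []) []]
          cases h : PySem.Chars.splitOnMax.go sep fuel m t [] [] with
          | nil => simp
          | cons x xs => simp

theorem splitOnMax_go_ne_nil (sep : List Char) (fuel : Nat) :
    ∀ (m : Nat) (l cur : List Char) (acc : List (List Char)),
      PySem.Chars.splitOnMax.go sep fuel m l cur acc ≠ [] := by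
  induction fuel with
  | zero => intro m l cur acc; simp [PySem.Chars.splitOnMax.go]
  | succ fuel ih =>
    intro m l cur acc
    cases l with
    | nil => simp [PySem.Chars.splitOnMax.go]
    | cons c t =>
      simp only [PySem.Chars.splitOnMax.go]
      by_cases hm : m = 0
      · simp [hm]
      · simp only [hm, if_false]
        by_cases hp : sep.isPrefixOf (c :: t) = true
        · simp only [hp, if_pos]; exact ih _ _ _ _
        · simp only [hp]; exact ih _ _ _ _

theorem splitOnMax_go_len (sep : List Char) (fuel : Nat) :
    ∀ (m : Nat) (l cur : List Char) (acc : List (List Char)),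
      (PySem.Chars.splitOnMax.go sep fuel m l cur acc).length ≤ acc.length + m + 1 := by
  induction fuel with
  | zero => intro m l cur acc; simp [PySem.Chars.splitOnMax.go]
  | succ fuel ih =>
    intro m l cur acc
    cases l with
    | nil => simp [PySem.Chars.splitOnMax.go]
    | cons c t =>
      simp only [PySem.Chars.splitOnMax.go]
      by_cases hm : m = 0
      · simp [hm]
      · simp only [hm, if_false]
        by_cases hp : sep.isPrefixOf (c :: t) = true
        · simp only [hp, if_pos]
          have := ih (m-1) (List.drop sep.length (c::t)) [] (cur.reverse :: acc)
          simp at this; omega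
        · simp only [hp]; exact ih _ _ _ _

-- split("#", 1) yields exactly one or two parts
theorem splitOnMax_shape (Y : List Char) :
    (∃ y, PySem.Chars.splitOnMax Y ['#'] 1 = [y]) ∨
      (∃ y z, PySem.Chars.splitOnMax Y ['#'] 1 = [y, z]) := by
  have h1 : PySem.Chars.splitOnMax Y ['#'] 1 ≠ [] := by
    simp only [PySem.Chars.splitOnMax]
    norm_num
    exact splitOnMax_go_ne_nil _ _ _ _ _ _
  have h2 : (PySem.Chars.splitOnMax Y ['#'] 1).length ≤ 2 := by
    simp only [PySem.Chars.splitOnMax]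
    norm_num
    have := splitOnMax_go_len ['#'] (Y.length + 1) (Int.toNat 1) Y [] []
    simpa using this
  match h : PySem.Chars.splitOnMax Y ['#'] 1 with
  | [] => exact absurd h h1
  | [y] => exact Or.inl ⟨y, rfl⟩
  | [y, z] => exact Or.inr ⟨y, z, rfl⟩
  | y :: z :: w :: rest => rw [h] at h2; simp at h2

theorem splitOnMax_cons (c : Char) (l : List Char) (hc : c ≠ '#') :
    PySem.Chars.splitOnMax (c :: l) ['#'] 1 =
      (PySem.Chars.splitOnMax l ['#'] 1).modifyHead (c :: ·) := by
  have hp : (['#'] : List Char).isPrefixOf (c :: l) = false := by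
    simp [List.isPrefixOf]
    intro h; exact absurd h.symm hc
  simp only [PySem.Chars.splitOnMax]
  norm_num
  simp only [List.length_cons, PySem.Chars.splitOnMax.go, hp]
  norm_num
  rw [splitOnMax_go_state ['#'] (l.length + 1) 1 l [c] []]
  simp

-- the composite: a leading '\r'/'\n' does not change what a segment contributes
theorem gar_alt_part_break (c : Char) (hc : c = '\r' ∨ c = '\n') (l : List Char) :
    gar_alt_part (c :: l) = gar_alt_part l := by
  have hcs : c ≠ '#' ∧ c ≠ '/' ∧ PySem.Chars.isspace c = true := by
    rcases hc with h | h <;> subst h <;> exact ⟨by decide, by decide, by decide⟩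
  obtain ⟨h1, h2, hsp⟩ := hcs
  have hp1 : (['#'] : List Char).isPrefixOf (c :: l) = false := by
    simp [List.isPrefixOf]; intro h; exact absurd h.symm h1
  have r1 : PySem.Chars.replace (c :: l) ['#'] ['#'] = c :: PySem.Chars.replace l ['#'] ['#'] :=
    replace_cons _ _ _ _ hp1 (by simp)
  set X := PySem.Chars.replace l ['#'] ['#'] with hX
  have hp2 : (['/', '/'] : List Char).isPrefixOf (c :: X) = false := by
    simp [List.isPrefixOf]; intro h; exact absurd h.symm h2
  have r2 : PySem.Chars.replace (c :: X) ['/','/'] ['#'] = c :: PySem.Chars.replace X ['/','/'] ['#'] :=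
    replace_cons _ _ _ _ hp2 (by simp)
  set Y := PySem.Chars.replace X ['/','/'] ['#'] with hY
  have hsplit := splitOnMax_cons c Y h1
  have hshape := splitOnMax_shape Y
  have t1 : "#".toList = ['#'] := rfl
  have t2 : "//".toList = ['/','/'] := rfl
  simp only [gar_alt_part, remove_comments_alt, PySem.Str.replace, PySem.Str.splitMax?,
    String.toList_ofList, t1, t2]
  rw [r1, r2]
  simp only [← hX, ← hY, PySem.Chars.splitMax?]
  norm_num
  rw [hsplit]
  rcases hshape with ⟨y, hy⟩ | ⟨y, z, hy⟩ <;>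
    simp only [hy, List.modifyHead_cons, List.map_cons, List.map_nil] <;>
    simp [PySem.Str.strip, PySem.Chars.strip, PySem.Chars.lstrip, hsp, PySem.Str.split₀]

-- A's loop with the index test removed (valid while index ≠ n-1)
def gar_stepNB (st : List Char × List (List String)) (char : Char) :
    List Char × List (List String) :=
  let st' :=
    if char = '\r' ∨ char = '\n' then
      let code := (remove_comments_py (String.ofList st.1)).1
      let parts := PySem.Str.split₀ (PySem.Str.strip code)
      (([] : List Char), if parts ≠ [] then st.2 ++ [parts] else st.2)
    else st
  (st'.1 ++ [char], st'.2)

theorem enumerate_bounds {l : List Char} {s : Int} :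
    ∀ x ∈ PySem.List.enumerate l s, s ≤ x.1 ∧ x.1 < s + l.length := by
  induction l generalizing s with
  | nil => simp [PySem.List.enumerate]
  | cons c t ih =>
    intro x hx
    simp only [PySem.List.enumerate, List.mem_cons] at hx
    rcases hx with h | h
    · subst h; simp
    · have := ih (s := s + 1) x h
      simp at this ⊢
      omega

theorem fold_enum_eq_foldNB (n : Int) (l : List Char) :
    ∀ (s : Int), (∀ x ∈ PySem.List.enumerate l s, x.1 ≠ n - 1) →
    ∀ st, (PySem.List.enumerate l s).foldl (gar_step_py n) st = l.foldl gar_stepNB st := by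
  induction l with
  | nil => intro s h st; simp [PySem.List.enumerate]
  | cons c t ih =>
    intro s h st
    simp only [PySem.List.enumerate, List.foldl_cons]
    have hs : s ≠ n - 1 := by
      have := h (s, c) (by simp [PySem.List.enumerate])
      simpa using this
    have hstep : gar_step_py n st (s, c) = gar_stepNB st c := by
      simp only [gar_step_py, gar_stepNB, hs]
      by_cases hc : c = '\r' ∨ c = '\n'
      · simp [hc]
      · simp [hc]
    rw [hstep]
    exact ih (s + 1) (fun x hx => h x (by simp [PySem.List.enumerate, hx])) _

theorem enumerate_concat (l : List Char) (a : Char) (s : Int) :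
    PySem.List.enumerate (l ++ [a]) s = PySem.List.enumerate l s ++ [(s + l.length, a)] := by
  induction l generalizing s with
  | nil => simp [PySem.List.enumerate]
  | cons c t ih => simp_all [PySem.List.enumerate]; ring_nf

-- A's emission step written through B's per-segment function
theorem emit_eq (line : List Char) (out : List (List String)) :
    (if PySem.Str.split₀ (PySem.Str.strip (remove_comments_py (String.ofList line)).1) ≠ []
      then out ++ [PySem.Str.split₀ (PySem.Str.strip (remove_comments_py (String.ofList line)).1)]
      else out) = out ++ (gar_alt_part line).toList := by
  have halt : remove_comments_alt = remove_comments_py := rfl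
  simp only [gar_alt_part, halt]
  split_ifs with h1 h2 <;> simp_all

-- the loop invariant: A's fold produces B's filterMap over the split segments
theorem foldNB_main (l : List Char) :
    ∀ (line : List Char) (out : List (List String)),
      (l.foldl gar_stepNB (line, out)).2 ++ (gar_alt_part (l.foldl gar_stepNB (line, out)).1).toList =
        out ++ ((l.splitOnP (fun c => c = '\r' || c = '\n')).modifyHead (line ++ ·)).filterMap gar_alt_part := by
  induction l with
  | nil =>
    intro line out
    simp only [List.foldl_nil, List.splitOnP_nil, List.modifyHead_cons, List.filterMap_cons]
    cases h : gar_alt_part line <;> simp [h]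
  | cons c t ih =>
    intro line out
    obtain ⟨s, ss, hS⟩ : ∃ s ss, t.splitOnP (fun c => c = '\r' || c = '\n') = s :: ss := by
      cases h : t.splitOnP (fun c => c = '\r' || c = '\n') with
      | nil => exact absurd h (List.splitOnP_ne_nil _ _)
      | cons s ss => exact ⟨s, ss, rfl⟩
    by_cases hc : c = '\r' ∨ c = '\n'
    · have hstep : gar_stepNB (line, out) c = ([c], out ++ (gar_alt_part line).toList) := by
        simp only [gar_stepNB, hc, if_pos]
        rw [← emit_eq line out]
        simp
      have hsplit : (c :: t).splitOnP (fun c => c = '\r' || c = '\n') =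
          [] :: (s :: ss) := by
        rw [← hS, List.splitOnP_cons]
        simp [hc]
      rw [List.foldl_cons, hstep, ih, hsplit, hS]
      simp only [List.modifyHead_cons, List.filterMap_cons, List.singleton_append,
        List.append_nil]
      rw [gar_alt_part_break c hc s]
      cases h : gar_alt_part line <;> cases h2 : gar_alt_part s <;> simp
    · have hstep : gar_stepNB (line, out) c = (line ++ [c], out) := by
        simp [gar_stepNB, hc]
      have hsplit : (c :: t).splitOnP (fun c => c = '\r' || c = '\n') =
          (c :: s) :: ss := by
        rw [List.splitOnP_cons]
        simp only [hS]
        have : (c = '\r' || c = '\n') = false := by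
          rcases not_or.mp hc with ⟨h1, h2⟩; simp [h1, h2]
        simp [this]
      rw [List.foldl_cons, hstep, ih, hsplit, hS]
      simp

-- ===== VERDICT (by name: the statement is the Claim_ definition above) =====
theorem get_raw_assembly_py_spec : Claim_equal_get_raw_assembly_py := by
  intro string _
  unfold Spec_get_raw_assembly_py
  unfold get_raw_assembly_py get_raw_assembly_py_alt
  rw [PySem.Str.slice_to_neg_one, PySem.Str.len_eq]
  rcases List.eq_nil_or_concat string.toList with hnil | ⟨l', a, hcat⟩
  · rw [hnil]
    simp only [PySem.List.enumerate, List.foldl_nil, List.dropLast_nil, List.splitOnP_nil,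
      List.filterMap_cons, List.filterMap_nil]
    have : gar_alt_part [] = none := by decide
    simp [this]
  · rw [List.concat_eq_append] at hcat
    rw [hcat]
    rw [enumerate_concat, List.foldl_concat]
    have hn : ((l' ++ [a]).length : Int) = (l'.length : Int) + 1 := by simp
    rw [fold_enum_eq_foldNB _ _ 0
      (fun x hx => by
        have := enumerate_bounds x hx
        omega)]
    have hlast : ∀ st : List Char × List (List String),
        (gar_step_py ((l' ++ [a]).length : Int) st ((0 : Int) + l'.length, a)).2 =
          st.2 ++ (gar_alt_part st.1).toList := by
      intro st
      have hcond : ((0 : Int) + l'.length = ((l' ++ [a]).length : Int) - 1) := by simp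
      simp only [gar_step_py, hcond, or_true, if_pos]
      rw [← emit_eq st.1 st.2]
    rw [hlast]
    have := foldNB_main l' [] []
    simp only [List.nil_append] at this
    rw [this]
    have hmh : ∀ (S : List (List Char)), List.modifyHead (fun x => x) S = S := by
      intro S; cases S <;> simp
    rw [hmh, show (l' ++ [a]).dropLast = l' from by simp]
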